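-- pv_equiv track=rewrite | github.com/Pepsisalvaje/WordlistCraft | wordlistcraft.py | generar_audibles
-- ===== SOURCE A (Python) =====
-- import itertools
-- from typing import List
--
-- def generar_audibles(palabra: str) -> List[str]:
--     reemplazos = {
--         'v': ['v', 'b'],
--         'b': ['b', 'v'],
--         's': ['s', 'z'],
--         'z': ['z', 's'],
--         'c': ['c', 'k', 'q'],
--         'k': ['k', 'c', 'q'],
--         'q': ['q', 'k', 'c'],
--         'll': ['ll', 'y'],
--         'y': ['y', 'll'],
--         'r': ['r', 'rr'],
--         'rr': ['rr', 'r'],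
--         't': ['t', 'd'],
--         'd': ['d', 't'],
--         'g': ['g', 'j'],
--         'j': ['j', 'g']
--     }
--
--     segmentos = []
--     i = 0
--     palabra_lower = palabra
--     while i < len(palabra):
--         if i + 1 < len(palabra):
--             par = palabra_lower[i:i+2]
--             if par in reemplazos:
--                 segmentos.append(reemplazos[par])
--                 i += 2
--                 continue
--         c = palabra_lower[i]
--         if c in reemplazos:
--             segmentos.append(reemplazos[c])
--         else:
--             segmentos.append([palabra[i]])
--         i += 1
--
--     combinaciones = [''.join(p) for p in itertools.product(*segmentos)]
--     return combinaciones
-- ===== SOURCE B (Python) =====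
-- from typing import List
--
-- # The only multi-character replacement keys are the doubled letters 'll' and 'rr',
-- # so a single recursive pass can treat "doubled l/r" specially and use one
-- # single-character table, fusing tokenization and the cartesian product.
-- _DOBLES = {'l': ['ll', 'y'], 'r': ['rr', 'r']}
-- _SIMPLES = {
--     'v': ['v', 'b'], 'b': ['b', 'v'],
--     's': ['s', 'z'], 'z': ['z', 's'],
--     'c': ['c', 'k', 'q'], 'k': ['k', 'c', 'q'], 'q': ['q', 'k', 'c'],
--     'y': ['y', 'll'], 'r': ['r', 'rr'],
--     't': ['t', 'd'], 'd': ['d', 't'],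
--     'g': ['g', 'j'], 'j': ['j', 'g'],
-- }
--
-- def generar_audibles(palabra: str) -> List[str]:
--     def rec(i: int) -> List[str]:
--         if i >= len(palabra):
--             return ['']
--         c = palabra[i]
--         if i + 1 < len(palabra) and palabra[i + 1] == c and c in _DOBLES:
--             opciones, j = _DOBLES[c], i + 2
--         elif c in _SIMPLES:
--             opciones, j = _SIMPLES[c], i + 1
--         else:
--             opciones, j = [c], i + 1
--         colas = rec(j)
--         return [o + cola for o in opciones for cola in colas]
--     return rec(0)
-- ===== Notes on version B (the rewrite author's own statement) =====
-- stated objective: simpler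
-- what changed: Replaces A's two-phase design (index-driven while loop building a list of option segments, then itertools.product + join) with a single recursive pass that picks the options at each position (treating the only digraph keys ll/rr as doubled letters via a separate two-entry table) and directly combines them with the recursively generated tails.
import Mathlib
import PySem

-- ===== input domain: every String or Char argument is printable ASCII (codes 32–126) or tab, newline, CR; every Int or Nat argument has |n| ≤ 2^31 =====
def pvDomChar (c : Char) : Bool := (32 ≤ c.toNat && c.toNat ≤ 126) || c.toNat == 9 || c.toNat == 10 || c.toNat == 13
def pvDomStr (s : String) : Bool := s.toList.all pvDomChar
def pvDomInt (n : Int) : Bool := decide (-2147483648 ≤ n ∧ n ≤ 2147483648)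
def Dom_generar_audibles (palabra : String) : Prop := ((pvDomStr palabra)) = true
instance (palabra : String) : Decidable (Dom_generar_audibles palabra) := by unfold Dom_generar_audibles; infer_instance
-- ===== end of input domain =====

-- B fuses A's two phases (tokenizer loop + itertools.product) into one recursive pass that
-- treats the only digraph keys ('ll'/'rr') as doubled letters; objective: simpler decomposition.

-- ===== PORT A =====
-- A's reemplazos dict; strings represented as List Char (exact: keys/values are ASCII literals)
def pvReemplazos : PySem.Dict (List Char) (List (List Char)) := PySem.Dict.mk
  [ (['v'], [['v'], ['b']]), (['b'], [['b'], ['v']]),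
    (['s'], [['s'], ['z']]), (['z'], [['z'], ['s']]),
    (['c'], [['c'], ['k'], ['q']]), (['k'], [['k'], ['c'], ['q']]), (['q'], [['q'], ['k'], ['c']]),
    (['l','l'], [['l','l'], ['y']]), (['y'], [['y'], ['l','l']]),
    (['r'], [['r'], ['r','r']]), (['r','r'], [['r','r'], ['r']]),
    (['t'], [['t'], ['d']]), (['d'], [['d'], ['t']]),
    (['g'], [['g'], ['j']]), (['j'], [['j'], ['g']]) ]

-- A's while loop building `segmentos` (recursion on the remaining suffix = index i)
def pvSegs : List Char → List (List (List Char))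
  | [] => []
  | a :: b :: rest =>
      match PySem.Dict.get? pvReemplazos [a, b] with
      | some v => v :: pvSegs rest
      | none =>
          match PySem.Dict.get? pvReemplazos [a] with
          | some v => v :: pvSegs (b :: rest)
          | none => [[a]] :: pvSegs (b :: rest)
  | [a] =>
      match PySem.Dict.get? pvReemplazos [a] with
      | some v => [v]
      | none => [[[a]]]

-- itertools.product(*segmentos) with ''.join (rightmost segment varies fastest)
def pvProd : List (List (List Char)) → List (List Char)
  | [] => [[]]
  | seg :: rest => seg.flatMap (fun o => (pvProd rest).map (fun r => o ++ r))

def generar_audibles (palabra : String) : List String :=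
  (pvProd (pvSegs palabra.toList)).map (fun cs => String.ofList cs)

-- ===== PORT B =====
def pvDobles : PySem.Dict Char (List (List Char)) := PySem.Dict.mk
  [ ('l', [['l','l'], ['y']]), ('r', [['r','r'], ['r']]) ]

def pvSimples : PySem.Dict Char (List (List Char)) := PySem.Dict.mk
  [ ('v', [['v'], ['b']]), ('b', [['b'], ['v']]),
    ('s', [['s'], ['z']]), ('z', [['z'], ['s']]),
    ('c', [['c'], ['k'], ['q']]), ('k', [['k'], ['c'], ['q']]), ('q', [['q'], ['k'], ['c']]),
    ('y', [['y'], ['l','l']]), ('r', [['r'], ['r','r']]),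
    ('t', [['t'], ['d']]), ('d', [['d'], ['t']]),
    ('g', [['g'], ['j']]), ('j', [['j'], ['g']]) ]

def pvSingleOpts (c : Char) : List (List Char) :=
  match PySem.Dict.get? pvSimples c with
  | some v => v
  | none => [[c]]

-- Source B's rec(i): one pass, combining options with the recursively generated tails
def pvRec : List Char → List (List Char)
  | [] => [[]]
  | c :: rest =>
      match rest with
      | c2 :: rest2 =>
          if c2 = c then
            match PySem.Dict.get? pvDobles c with
            | some v => v.flatMap (fun o => (pvRec rest2).map (fun cola => o ++ cola))
            | none => (pvSingleOpts c).flatMap (fun o => (pvRec (c2 :: rest2)).map (fun cola => o ++ cola))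
          else (pvSingleOpts c).flatMap (fun o => (pvRec (c2 :: rest2)).map (fun cola => o ++ cola))
      | [] => (pvSingleOpts c).flatMap (fun o => (pvRec []).map (fun cola => o ++ cola))

def generar_audibles_alt (palabra : String) : List String :=
  (pvRec palabra.toList).map (fun cs => String.ofList cs)

-- ===== PRECONDITION & SPEC =====
def Spec_generar_audibles (palabra : String) (out : List String) : Prop := out = generar_audibles_alt palabra
instance (palabra : String) (out : List String) : Decidable (Spec_generar_audibles palabra out) := by unfold Spec_generar_audibles; infer_instance

-- ===== CLAIM (what is proved, stated in full; the proofs are below) =====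
def Claim_equal_generar_audibles : Prop := ∀ (palabra : String), Dom_generar_audibles palabra → Spec_generar_audibles palabra (generar_audibles palabra)

-- ===== LEMMAS AND PROOFS =====

-- the 1-char keys of A's table are exactly B's pvSimples
theorem pv_get_single (a : Char) :
    PySem.Dict.get? pvReemplazos [a] = PySem.Dict.get? pvSimples a := by
  by_cases h : a ∈ (['v','b','s','z','c','k','q','y','r','t','d','g','j'] : List Char)
  · fin_cases h <;> decide
  · have h1 : PySem.Dict.get? pvSimples a = none := by
      rw [PySem.Dict.get?_eq_none_iff_not_mem_keys]
      simpa [pvSimples] using h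
    have h2 : PySem.Dict.get? pvReemplazos [a] = none := by
      rw [PySem.Dict.get?_eq_none_iff_not_mem_keys]
      simpa [pvReemplazos] using h
    rw [h1, h2]

-- the 2-char keys of A's table ('ll', 'rr') are exactly B's doubled-letter table
theorem pv_get_pair (a b : Char) :
    PySem.Dict.get? pvReemplazos [a, b] =
      (if b = a then PySem.Dict.get? pvDobles a else none) := by
  by_cases h : b = a
  · subst h
    by_cases hb : b ∈ (['l','r'] : List Char)
    · fin_cases hb <;> decide
    · have h1 : PySem.Dict.get? pvDobles b = none := by
        rw [PySem.Dict.get?_eq_none_iff_not_mem_keys]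
        simpa [pvDobles] using hb
      have h2 : PySem.Dict.get? pvReemplazos [b, b] = none := by
        rw [PySem.Dict.get?_eq_none_iff_not_mem_keys]
        simp only [pvReemplazos, PySem.Dict.keys_mk, List.map_cons, List.map_nil]
        simp_all
      rw [h1, h2, if_pos rfl]
  · rw [if_neg h, PySem.Dict.get?_eq_none_iff_not_mem_keys]
    simp only [pvReemplazos, PySem.Dict.keys_mk, List.map_cons, List.map_nil]
    aesop

theorem pv_main (l : List Char) : pvProd (pvSegs l) = pvRec l := by
  induction l using pvSegs.induct with
  | case1 => rfl
  | case2 a b rest v hpair ih =>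
      have hb : b = a := by
        by_contra hne
        rw [pv_get_pair, if_neg hne] at hpair
        simp at hpair
      have hd : PySem.Dict.get? pvDobles a = some v := by
        rw [pv_get_pair, if_pos hb] at hpair
        exact hpair
      subst hb
      simp [pvSegs, pvRec, hpair, hd, pvProd, ih]
  | case3 a b rest hpair v hsingle ih =>
      have hopt : pvSingleOpts a = v := by
        rw [pvSingleOpts, ← pv_get_single, hsingle]
      by_cases hb : b = a
      · have hd : PySem.Dict.get? pvDobles a = none := by
          rw [pv_get_pair, if_pos hb] at hpair
          exact hpair
        subst hb
        simp [pvSegs, pvRec, hpair, hsingle, hd, hopt, pvProd, ih]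
      · simp [pvSegs, pvRec, hpair, hsingle, hopt, hb, pvProd, ih]
  | case4 a b rest hpair hsingle ih =>
      have hopt : pvSingleOpts a = [[a]] := by
        rw [pvSingleOpts, ← pv_get_single, hsingle]
      by_cases hb : b = a
      · have hd : PySem.Dict.get? pvDobles a = none := by
          rw [pv_get_pair, if_pos hb] at hpair
          exact hpair
        subst hb
        simp [pvSegs, pvRec, hpair, hsingle, hd, hopt, pvProd, ih]
      · simp [pvSegs, pvRec, hpair, hsingle, hopt, hb, pvProd, ih]
  | case5 a v hsingle =>
      have hopt : pvSingleOpts a = v := by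
        rw [pvSingleOpts, ← pv_get_single, hsingle]
      simp [pvSegs, pvRec, hsingle, hopt, pvProd]
  | case6 a hsingle =>
      have hopt : pvSingleOpts a = [[a]] := by
        rw [pvSingleOpts, ← pv_get_single, hsingle]
      simp [pvSegs, pvRec, hsingle, hopt, pvProd]

-- ===== VERDICT (by name: the statement is the Claim_ definition above) =====
theorem generar_audibles_spec : Claim_equal_generar_audibles := by
  intro palabra _
  unfold Spec_generar_audibles generar_audibles generar_audibles_alt
  rw [pv_main]
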